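-- pv_equiv track=rewrite | github.com/ywkim727/Algorithm_Solve | 프로그래머스/unrated/120921. 문자열 밀기/문자열 밀기.py | solution
-- ===== SOURCE A (Python) =====
-- def solution(A, B):
--     answer = 0
--     count = 0
--     if A == B :
--         return 0
--     else :
--         for _ in range(len(A)) :
--             temp = A[-1] + A[:-1]
--             count += 1
--             if temp == B :
--                 break
--             else :
--                 A = temp
--         if count == len(A) :
--             answer = -1
--         else :
--             answer += count
--     return answer
-- ===== SOURCE B (Python) =====
-- def solution(A, B):
--     if A == B:
--         return 0
--     if len(A) != len(B):
--         return -1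
--     return (B + B).find(A)
-- ===== Notes on version B (the rewrite author's own statement) =====
-- stated objective: faster
-- what changed: Replaces the rotate-and-compare loop (one rotation and one full string comparison per step) by a single substring search: the number of right-rotations turning A into B is the index of the first occurrence of A in B+B, so B checks equality/length and returns (B+B).find(A).
import Mathlib
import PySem

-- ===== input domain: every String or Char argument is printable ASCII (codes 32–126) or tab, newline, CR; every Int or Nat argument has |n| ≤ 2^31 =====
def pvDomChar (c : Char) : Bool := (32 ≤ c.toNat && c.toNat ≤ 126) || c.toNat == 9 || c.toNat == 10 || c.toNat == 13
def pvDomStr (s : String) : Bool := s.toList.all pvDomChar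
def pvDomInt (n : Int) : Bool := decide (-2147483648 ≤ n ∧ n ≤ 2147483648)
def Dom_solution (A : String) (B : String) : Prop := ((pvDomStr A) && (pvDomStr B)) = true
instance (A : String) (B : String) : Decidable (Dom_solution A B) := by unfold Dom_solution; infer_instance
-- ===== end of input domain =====

-- B replaces A's rotate-and-compare loop by a single substring search in B+B (see Source B).

-- ===== PORT A =====
-- temp = A[-1] + A[:-1] : one right rotation.  The 'none' branch (A[-1] on the empty
-- string would raise IndexError) is unreachable: the loop body only runs when
-- range(len(A)) is nonempty, i.e. A ≠ "".
def rotrA (l : List Char) : List Char :=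
  match PySem.List.pyGet? l (-1) with
  | some c => c :: PySem.List.slice l none (some (-1))
  | none => []

-- the for-loop with its break: fuel = range(len(A)); state = (current A, count)
def loopA (b : List Char) : Nat → List Char → Nat → (List Char × Nat)
  | 0, a, c => (a, c)
  | k + 1, a, c =>
      let temp := rotrA a
      if temp = b then (a, c + 1)
      else loopA b k temp (c + 1)

-- ported on .toList (string equality and concatenation are list equality/append)
def solution (A : String) (B : String) : Int :=
  if A.toList = B.toList then 0
  else
    let r := loopA B.toList A.toList.length A.toList 0
    if r.2 = r.1.length then -1 else (r.2 : Int)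

-- ===== PORT B =====
def solution_alt (A : String) (B : String) : Int :=
  if A.toList = B.toList then 0
  else if A.toList.length ≠ B.toList.length then -1
  else PySem.Chars.find (B.toList ++ B.toList) A.toList

-- ===== PRECONDITION & SPEC =====
def Spec_solution (A : String) (B : String) (out : Int) : Prop := out = solution_alt A B
instance (A : String) (B : String) (out : Int) : Decidable (Spec_solution A B out) := by unfold Spec_solution; infer_instance

-- ===== CLAIM (what is proved, stated in full; the proofs are below) =====
def Claim_equal_solution : Prop := ∀ (A : String) (B : String), Dom_solution A B → Spec_solution A B (solution A B)

-- ===== LEMMAS AND PROOFS =====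

theorem rotrA_concat (ys : List Char) (x : Char) : rotrA (ys ++ [x]) = x :: ys := by
  simp [rotrA, PySem.List.pyGet?_neg_one_append_singleton, PySem.List.slice_to_neg_one]

theorem length_rotrA (l : List Char) : (rotrA l).length = l.length := by
  rcases List.eq_nil_or_concat l with rfl | ⟨ys, x, rfl⟩
  · rfl
  · simp [rotrA_concat]

theorem length_rotrA_iterate (j : Nat) (a : List Char) :
    (rotrA^[j] a).length = a.length := by
  induction j with
  | zero => rfl
  | succ j ih => rw [Function.iterate_succ_apply', length_rotrA, ih]

-- iterated right rotation in drop/take form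
theorem rotrA_iterate (a : List Char) (k : Nat) (hk : k ≤ a.length) :
    rotrA^[k] a = a.drop (a.length - k) ++ a.take (a.length - k) := by
  induction k with
  | zero => simp
  | succ k ih =>
      have hk' : k ≤ a.length := by omega
      rw [Function.iterate_succ_apply', ih hk']
      have hidx : a.length - (k + 1) < a.length := by omega
      have htake : a.take (a.length - k) = a.take (a.length - (k+1)) ++ [a[a.length - (k+1)]] := by
        have he : a.length - k = (a.length - (k+1)) + 1 := by omega
        rw [he, List.take_add_one, List.getElem?_eq_getElem hidx]
        simp
      have hdrop : a.drop (a.length - (k+1)) = a[a.length - (k+1)] :: a.drop (a.length - k) := by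
        have he : a.length - k = (a.length - (k+1)) + 1 := by omega
        rw [he, List.drop_eq_getElem_cons hidx]
      rw [htake, ← List.append_assoc, rotrA_concat, hdrop]
      simp

-- rot^k A = B  ↔  A = B[k:] + B[:k]    (equal lengths, k ≤ n)
theorem rot_eq_iff (a b : List Char) (k : Nat) (hlen : a.length = b.length)
    (hk : k ≤ a.length) :
    rotrA^[k] a = b ↔ a = b.drop k ++ b.take k := by
  rw [rotrA_iterate a k hk]
  constructor
  · intro h
    have hl : (a.drop (a.length - k)).length = k := by simp; omega
    have h1 : b.drop k = a.take (a.length - k) := by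
      rw [← h, List.drop_left' hl]
    have h2 : b.take k = a.drop (a.length - k) := by
      rw [← h, List.take_left' hl]
    rw [h1, h2, List.take_append_drop]
  · intro h
    have hbd : (b.drop k).length = a.length - k := by simp; omega
    have h1 : a.drop (a.length - k) = b.take k := by
      have h' := List.drop_left' (l₂ := b.take k) hbd
      rwa [← h] at h'
    have h2 : a.take (a.length - k) = b.drop k := by
      have h' := List.take_left' (l₂ := b.take k) hbd
      rwa [← h] at h'
    rw [h1, h2, List.take_append_drop]

-- A = B[k:] + B[:k]  ↔  A is a prefix of (B++B)[k:]
theorem prefix_iff (a b : List Char) (k : Nat) (hlen : a.length = b.length)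
    (hk : k ≤ b.length) :
    a <+: (b ++ b).drop k ↔ a = b.drop k ++ b.take k := by
  have hd : (b ++ b).drop k = b.drop k ++ b := List.drop_append_of_le_length hk
  rw [hd, List.prefix_iff_eq_take, hlen]
  have ht : (b.drop k ++ b).take b.length = b.drop k ++ b.take k := by
    rw [List.take_append]
    congr 1
    · exact List.take_of_length_le (by simp)
    · congr 1; simp; omega
  rw [ht]

theorem loopA_length (b : List Char) (fuel : Nat) :
    ∀ a c, (loopA b fuel a c).1.length = a.length := by
  induction fuel with
  | zero => intro a c; rfl
  | succ k ih =>
      intro a c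
      simp only [loopA]
      split
      · rfl
      · rw [ih, length_rotrA]

theorem loopA_no (b : List Char) (fuel : Nat) :
    ∀ a c, (∀ j, 1 ≤ j → j ≤ fuel → rotrA^[j] a ≠ b) →
      (loopA b fuel a c).2 = c + fuel := by
  induction fuel with
  | zero => intro a c _; rfl
  | succ k ih =>
      intro a c h
      simp only [loopA]
      split
      · next ht => exact absurd (by simpa using ht) (h 1 le_rfl (by omega))
      · rw [ih (rotrA a) (c + 1) (fun j h1 h2 => by
          have hj := h (j + 1) (by omega) (by omega)
          rwa [Function.iterate_succ_apply] at hj)]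
        omega

theorem loopA_yes (b : List Char) (fuel : Nat) :
    ∀ a c j₀, 1 ≤ j₀ → j₀ ≤ fuel → rotrA^[j₀] a = b →
      (∀ j, 1 ≤ j → j < j₀ → rotrA^[j] a ≠ b) →
      (loopA b fuel a c).2 = c + j₀ := by
  induction fuel with
  | zero => intro a c j₀ h1 h2; omega
  | succ k ih =>
      intro a c j₀ h1 h2 hb hmin
      simp only [loopA]
      split
      · next ht =>
        have hj1 : j₀ = 1 := by
          by_contra hne
          exact hmin 1 le_rfl (by omega) (by simpa using ht)
        simp [hj1]
      · next ht =>
        have hj2 : 2 ≤ j₀ := by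
          rcases Nat.lt_or_ge j₀ 2 with h | h
          · interval_cases j₀
            exact absurd (by simpa using hb) ht
          · exact h
        rw [ih (rotrA a) (c + 1) (j₀ - 1) (by omega) (by omega)
          (by rw [← Function.iterate_succ_apply]
              show rotrA^[j₀ - 1 + 1] a = b
              have he : j₀ - 1 + 1 = j₀ := by omega
              rw [he]; exact hb)
          (fun j hj1 hj2' => by
            have hj := hmin (j + 1) (by omega) (by omega)
            rwa [Function.iterate_succ_apply] at hj)]
        omega

-- ===== VERDICT (by name: the statement is the Claim_ definition above) =====
theorem solution_spec : Claim_equal_solution := by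
  unfold Claim_equal_solution
  intro A B _
  unfold Spec_solution solution solution_alt
  by_cases hab : A.toList = B.toList
  · simp [hab]
  · simp only [if_neg hab]
    set a := A.toList with ha
    set b := B.toList with hb
    set n := a.length with hn
    by_cases hlen : a.length = b.length
    · -- equal lengths; n ≥ 1 since a ≠ b
      have hn1 : 1 ≤ n := by
        rcases Nat.eq_zero_or_pos n with h0 | h; swap; · exact h
        exact absurd (by
          have hae : a = [] := List.eq_nil_of_length_eq_zero h0
          have hbe : b = [] := List.eq_nil_of_length_eq_zero (by omega)
          rw [hae, hbe]) hab
      by_cases hf : 0 ≤ PySem.Chars.find (b ++ b) a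
      · -- A occurs in B+B at first index i; the loop breaks after exactly i rotations
        obtain ⟨hpre, hmin⟩ := PySem.Chars.find_spec (s := b ++ b) (sub := a) hf
        set i := (PySem.Chars.find (b ++ b) a).toNat with hi
        have hilen : i ≤ n := by
          have h' := hpre.length_le
          simp at h'
          omega
        have heq : a = b.drop i ++ b.take i :=
          (prefix_iff a b i hlen (by omega)).mp hpre
        have hi0 : i ≠ 0 := by
          intro h0
          rw [h0] at heq
          simp at heq
          exact hab heq
        have hiN : i ≠ n := by
          intro hN
          have hdn : List.drop n b = [] := List.drop_eq_nil_of_le (by omega)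
          have htn : List.take n b = b := List.take_of_length_le (by omega)
          rw [hN, hdn, htn] at heq
          exact hab heq
        have hrot : rotrA^[i] a = b := (rot_eq_iff a b i hlen hilen).mpr heq
        have hminrot : ∀ j, 1 ≤ j → j < i → rotrA^[j] a ≠ b := by
          intro j hj1 hji hbe
          have hpj : a <+: (b ++ b).drop j :=
            (prefix_iff a b j hlen (by omega)).mpr
              ((rot_eq_iff a b j hlen (by omega)).mp hbe)
          exact hmin j hji hpj
        have hc := loopA_yes b n a 0 i (by omega) hilen hrot hminrot
        have hl := loopA_length b n a 0
        rw [if_neg (by rw [hc, hl]; omega), if_neg (not_not_intro hlen), hc]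
        simp [hi, Int.toNat_of_nonneg hf]
      · -- A does not occur in B+B: no rotation matches, both sides give -1
        have hfe : PySem.Chars.find (b ++ b) a = -1 := by
          have h' := PySem.Chars.neg_one_le_find (b ++ b) a
          omega
        have hninf : ¬ a <:+: (b ++ b) := (PySem.Chars.find_eq_neg_one_iff _ _).mp hfe
        have hno : ∀ j, 1 ≤ j → j ≤ n → rotrA^[j] a ≠ b := by
          intro j hj1 hjn hbe
          have hpj : a <+: (b ++ b).drop j :=
            (prefix_iff a b j hlen (by omega)).mpr
              ((rot_eq_iff a b j hlen (by omega)).mp hbe)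
          exact hninf (List.infix_iff_prefix_suffix.mpr
            ⟨(b ++ b).drop j, hpj, List.drop_suffix _ _⟩)
        have hc := loopA_no b n a 0 hno
        have hl := loopA_length b n a 0
        rw [if_pos (by rw [hc, hl]; omega), if_neg (not_not_intro hlen), hfe]
    · -- unequal lengths: rotations preserve length, so the loop never breaks
      have hno : ∀ j, 1 ≤ j → j ≤ n → rotrA^[j] a ≠ b := by
        intro j _ _ hbe
        exact hlen (by rw [← hbe, length_rotrA_iterate])
      have hc := loopA_no b n a 0 hno
      have hl := loopA_length b n a 0
      rw [if_pos (by rw [hc, hl]; omega), if_pos hlen]
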